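-- pv_equiv track=rewrite | github.com/bbchallenge/bbchallenge-py | bbchallenge/tm_utils.py | to_bbchallenge_format
-- ===== SOURCE A (Python) =====
-- def ithl(i):
--     return chr(ord("A") + i)
--
-- def to_bbchallenge_format(tm) -> str:
--     to_ret = ""
--     for i, b in enumerate(tm):
--         if i % 6 == 0 and i != 0:
--             to_ret += "_"
--
--         if i % 3 == 0 and tm[i + 2] == 0:
--             to_ret += "-"
--             continue
--         if i % 3 == 1 and tm[i + 1] == 0:
--             to_ret += "-"
--             continue
--
--         if i % 3 == 0:
--             to_ret += "0" if b == 0 else "1"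
--         elif i % 3 == 1:
--             to_ret += "R" if b == 0 else "L"
--         else:
--             if b == 0:
--                 to_ret += "-"
--             else:
--                 to_ret += ithl(b - 1)
--
--     return to_ret
-- ===== SOURCE B (Python) =====
-- def to_bbchallenge_format(tm) -> str:
--     parts = []
--     for k in range(0, len(tm), 3):
--         w, m, g = tm[k], tm[k + 1], tm[k + 2]
--         if g == 0:
--             parts.append("---")
--         else:
--             parts.append(("0" if w == 0 else "1")
--                          + ("R" if m == 0 else "L")
--                          + chr(ord("A") + g - 1))
--     return "_".join("".join(parts[j:j + 2]) for j in range(0, len(parts), 2))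
-- ===== Notes on version B (the rewrite author's own statement) =====
-- stated objective: simpler
-- what changed: A walks the flat table element by element, branching on i%3/i%6 and peeking ahead at tm[i+2]/tm[i+1]; B formats each 3-element transition in one step of a strided per-triple loop and then joins the two-transition state groups with '_'.join.
import Mathlib
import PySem

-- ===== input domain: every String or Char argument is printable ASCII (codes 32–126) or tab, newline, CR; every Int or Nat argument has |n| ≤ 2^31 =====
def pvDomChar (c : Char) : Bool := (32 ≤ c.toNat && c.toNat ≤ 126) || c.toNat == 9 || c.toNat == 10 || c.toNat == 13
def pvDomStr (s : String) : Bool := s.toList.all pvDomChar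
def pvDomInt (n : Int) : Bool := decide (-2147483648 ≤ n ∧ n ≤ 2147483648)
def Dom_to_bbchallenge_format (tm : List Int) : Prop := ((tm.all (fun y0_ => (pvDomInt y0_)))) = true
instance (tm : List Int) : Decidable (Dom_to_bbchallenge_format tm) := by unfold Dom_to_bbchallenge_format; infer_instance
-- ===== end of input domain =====

-- B replaces A's flat per-element loop (modular branching + index lookahead) by a per-triple
-- pass that formats each transition once and then joins state pairs with "_" (simpler decomposition).


-- ===== PORT A =====
-- ithl(i) = chr(ord("A") + i)
def ithlP (i : Int) : String := String.ofList [Char.ofNat (65 + i).toNat]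

-- the body of A's `for i, b in enumerate(tm)` loop (to_ret is the accumulator)
def stepA (tm : List Int) (to_ret : String) (ib : Int × Int) : String :=
  let i := ib.1
  let b := ib.2
  let to_ret := if i % 6 = 0 ∧ i ≠ 0 then to_ret ++ "_" else to_ret
  if i % 3 = 0 ∧ (PySem.List.pyGet? tm (i + 2)).getD 0 = 0 then to_ret ++ "-"
  else if i % 3 = 1 ∧ (PySem.List.pyGet? tm (i + 1)).getD 0 = 0 then to_ret ++ "-"
  else if i % 3 = 0 then to_ret ++ (if b = 0 then "0" else "1")
  else if i % 3 = 1 then to_ret ++ (if b = 0 then "R" else "L")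
  else if b = 0 then to_ret ++ "-" else to_ret ++ ithlP (b - 1)

def to_bbchallenge_format (tm : List Int) : String :=
  (PySem.List.enumerate tm 0).foldl (stepA tm) ""

-- ===== PORT B =====
-- one formatted transition (the body of B's per-triple loop)
def triStr (w m g : Int) : String :=
  if g = 0 then "---"
  else (if w = 0 then "0" else "1") ++ (if m = 0 then "R" else "L") ++
       String.ofList [Char.ofNat (65 + g - 1).toNat]

-- B's `for k in range(0, len(tm), 3)` pass, three elements at a time
def triChunks : List Int → List String
  | w :: m :: g :: rest => triStr w m g :: triChunks rest
  | _ => []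

-- B's `["".join(parts[j:j+2]) for j in range(0, len(parts), 2)]`
def pairJoin : List String → List String
  | a :: b :: rest => (a ++ b) :: pairJoin rest
  | l => l

def to_bbchallenge_format_alt (tm : List Int) : String :=
  PySem.Str.join "_" (pairJoin (triChunks tm))

-- ===== PRECONDITION & SPEC =====
-- Pre_ excludes lengths not divisible by 3 (A raises IndexError; B raises it too) and nonzero
-- goto values g for which chr(ord("A")+g-1) raises ValueError in Python (code point out of
-- range), or yields a UTF-16 surrogate — there A returns a surrogate string that Lean's Char
-- cannot represent (B returns the same string; excluded only for portability).
def Pre_to_bbchallenge_format (tm : List Int) : Prop :=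
  tm.length % 3 = 0 ∧
  ∀ p ∈ PySem.List.enumerate tm 0, p.1 % 3 = 2 →
    (p.2 = 0 ∨ (0 ≤ p.2 + 64 ∧ (p.2 + 64 < 55296 ∨ (57344 ≤ p.2 + 64 ∧ p.2 + 64 < 1114112))))
instance (tm : List Int) : Decidable (Pre_to_bbchallenge_format tm) := by
  unfold Pre_to_bbchallenge_format; infer_instance

def pvWitness_to_bbchallenge_format : List Int := [1, 0, 2, 0, 1, 0]

def Spec_to_bbchallenge_format (tm : List Int) (out : String) : Prop := out = to_bbchallenge_format_alt tm
instance (tm : List Int) (out : String) : Decidable (Spec_to_bbchallenge_format tm out) := by unfold Spec_to_bbchallenge_format; infer_instance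

-- ===== CLAIM (what is proved, stated in full; the proofs are below) =====
def Claim_equal_to_bbchallenge_format : Prop := ∀ (tm : List Int), Dom_to_bbchallenge_format tm → Pre_to_bbchallenge_format tm → Spec_to_bbchallenge_format tm (to_bbchallenge_format tm)

-- ===== LEMMAS AND PROOFS =====

theorem join_cons_cons (x y : String) (l : List String) :
    PySem.Str.join "_" (x :: y :: l) = x ++ "_" ++ PySem.Str.join "_" (y :: l) := by
  simp only [PySem.Str.join, List.map_cons, PySem.Chars.join_cons_cons]
  generalize PySem.Chars.join "_".toList (y.toList :: List.map String.toList l) = J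
  simp [String.ofList_append]
  rw [show ('_' :: J) = "_".toList ++ J by simp]
  rw [String.ofList_append, String.ofList_toList, String.append_assoc]

theorem join_singleton (x : String) : PySem.Str.join "_" [x] = x := by
  simp [PySem.Str.join]

theorem join_nil : PySem.Str.join "_" [] = "" := by decide

theorem triChunks_nil_iff (l : List Int) (h : l.length % 3 = 0) :
    triChunks l = [] ↔ l = [] := by
  match l with
  | [] => simp [triChunks]
  | [_] => simp at h
  | [_, _] => simp at h
  | _ :: _ :: _ :: _ => simp [triChunks]

theorem pairJoin_ne_nil (l : List String) (h : l ≠ []) : pairJoin l ≠ [] := by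
  match l with
  | [_] => simp [pairJoin]
  | _ :: _ :: _ => simp [pairJoin]

-- evaluating A's loop body at the three positions of a triple
theorem stepA_w (tm : List Int) (acc : String) (i b g : Int) (h3 : i % 3 = 0)
    (hget : (PySem.List.pyGet? tm (i + 2)).getD 0 = g) :
    stepA tm acc (i, b)
      = (if i % 6 = 0 ∧ i ≠ 0 then acc ++ "_" else acc) ++
        (if g = 0 then "-" else if b = 0 then "0" else "1") := by
  unfold stepA
  by_cases hgz : g = 0
  · rw [if_pos ⟨h3, by rw [hget, hgz]⟩, if_pos hgz]
  · rw [if_neg (fun h => hgz (hget ▸ h.2)), if_neg (fun h => by omega),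
        if_pos h3, if_neg hgz]

theorem stepA_m (tm : List Int) (acc : String) (i b g : Int) (h3 : i % 3 = 1)
    (hget : (PySem.List.pyGet? tm (i + 1)).getD 0 = g) :
    stepA tm acc (i, b)
      = acc ++ (if g = 0 then "-" else if b = 0 then "R" else "L") := by
  unfold stepA
  dsimp only
  rw [if_neg (by omega : ¬(i % 6 = 0 ∧ i ≠ 0))]
  by_cases hgz : g = 0
  · rw [if_neg (fun h => by omega), if_pos ⟨h3, by rw [hget, hgz]⟩, if_pos hgz]
  · rw [if_neg (fun h => by omega), if_neg (fun h => hgz (hget ▸ h.2)),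
        if_neg (by omega : ¬ i % 3 = 0), if_pos h3, if_neg hgz]

theorem stepA_g (tm : List Int) (acc : String) (i b : Int) (h3 : i % 3 = 2) :
    stepA tm acc (i, b)
      = acc ++ (if b = 0 then "-" else ithlP (b - 1)) := by
  unfold stepA
  dsimp only
  rw [if_neg (by omega : ¬(i % 6 = 0 ∧ i ≠ 0)),
      if_neg (fun h => by omega), if_neg (fun h => by omega),
      if_neg (by omega : ¬ i % 3 = 0), if_neg (by omega : ¬ i % 3 = 1)]
  by_cases hb : b = 0
  · rw [if_pos hb, if_pos hb]
  · rw [if_neg hb, if_neg hb]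

-- processing one triple (w, m, g) of A's loop appends exactly B's formatted transition
theorem step3 (tm : List Int) (w m g : Int) (rest : List Int) (n : Nat) (acc : String)
    (hd : tm.drop n = w :: m :: g :: rest) (h3 : n % 3 = 0) :
    (PySem.List.enumerate (w :: m :: g :: rest) (n : Int)).foldl (stepA tm) acc
      = (PySem.List.enumerate rest ((n : Int) + 3)).foldl (stepA tm)
          ((if (n : Int) % 6 = 0 ∧ (n : Int) ≠ 0 then acc ++ "_" else acc) ++ triStr w m g) := by
  have hg2 : (PySem.List.pyGet? tm ((n : Int) + 2)).getD 0 = g := by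
    rw [show ((n : Int) + 2) = ((n + 2 : Nat) : Int) by push_cast; ring,
        PySem.List.pyGet?_natCast, ← List.getElem?_drop, hd]
    rfl
  have hg1 : (PySem.List.pyGet? tm ((n : Int) + 1 + 1)).getD 0 = g := by
    rw [show ((n : Int) + 1 + 1) = ((n : Int) + 2) by ring]; exact hg2
  simp only [PySem.List.enumerate_cons, List.foldl_cons]
  rw [stepA_w tm acc (n : Int) w g (by omega) hg2,
      stepA_m tm _ ((n : Int) + 1) m g (by omega) hg1,
      stepA_g tm _ ((n : Int) + 1 + 1) g (by omega),
      show ((n : Int) + 1 + 1 + 1) = ((n : Int) + 3) by ring]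
  by_cases hg : g = 0
  · rw [if_pos hg, if_pos hg, if_pos hg]
    simp [triStr, hg, String.append_assoc]
  · rw [if_neg hg, if_neg hg]
    have hch : (65 : Int) + (g - 1) = 65 + g - 1 := by ring
    simp only [triStr, ithlP, hch, if_neg hg]
    simp [String.append_assoc]

theorem foldA_eq (tm : List Int) (htm : tm.length % 3 = 0) (l : List Int) (n : Nat) (acc : String)
    (hd : tm.drop n = l) (h6 : n % 6 = 0) :
    (PySem.List.enumerate l (n : Int)).foldl (stepA tm) acc
      = acc ++ (if l = [] then "" else if n = 0 then "" else "_") ++ to_bbchallenge_format_alt l := by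
  have hlen : l.length % 3 = 0 := by
    have := congrArg List.length hd
    simp only [List.length_drop] at this
    omega
  match l with
  | [] =>
    simp [PySem.List.enumerate_nil, to_bbchallenge_format_alt, triChunks, pairJoin, join_nil]
  | [_] => simp at hlen
  | [_, _] => simp at hlen
  | w0 :: m0 :: g0 :: rest =>
    have h3 : n % 3 = 0 := by omega
    rw [step3 tm w0 m0 g0 rest n acc hd h3]
    have hsep : (if (n : Int) % 6 = 0 ∧ (n : Int) ≠ 0 then acc ++ "_" else acc)
        = acc ++ (if n = 0 then "" else "_") := by
      by_cases hn : n = 0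
      · subst hn; simp
      · rw [if_pos ⟨by omega, by omega⟩, if_neg hn]
    rw [hsep]
    have hd3 : tm.drop (n + 3) = rest := by
      have h := congrArg (List.drop 3) hd
      rw [List.drop_drop] at h
      simpa using h
    match rest with
    | [] =>
      simp only [PySem.List.enumerate_nil, List.foldl_nil, to_bbchallenge_format_alt,
        triChunks, pairJoin, join_singleton]
      simp [String.append_assoc]
    | [_] => simp at hlen
    | [_, _] => simp at hlen
    | w1 :: m1 :: g1 :: rest' =>
      rw [show ((n : Int) + 3) = ((n + 3 : Nat) : Int) by push_cast; ring]
      rw [step3 tm w1 m1 g1 rest' (n + 3) _ hd3 (by omega)]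
      rw [if_neg (by omega : ¬ (((n + 3 : Nat) : Int) % 6 = 0 ∧ ((n + 3 : Nat) : Int) ≠ 0))]
      have hd6 : tm.drop (n + 6) = rest' := by
        have h := congrArg (List.drop 3) hd3
        rw [List.drop_drop] at h
        simpa using h
      rw [show (((n + 3 : Nat) : Int) + 3) = ((n + 6 : Nat) : Int) by push_cast; ring]
      rw [foldA_eq tm htm rest' (n + 6) _ hd6 (by omega)]
      by_cases hr : rest' = []
      · subst hr
        simp [to_bbchallenge_format_alt, triChunks, pairJoin, join_singleton, join_nil,
          String.append_assoc]
      · have hrl : rest'.length % 3 = 0 := by simp at hlen; omega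
        have htc : triChunks rest' ≠ [] := by
          rw [Ne, triChunks_nil_iff rest' hrl]; exact hr
        obtain ⟨x, xs, hx⟩ := List.exists_cons_of_ne_nil (pairJoin_ne_nil _ htc)
        rw [if_neg hr, if_neg (by omega : ¬ n + 6 = 0)]
        simp only [to_bbchallenge_format_alt, triChunks, pairJoin, hx]
        rw [join_cons_cons, ← hx]
        simp [String.append_assoc]
termination_by l.length

-- ===== VERDICT (by name: the statement is the Claim_ definition above) =====
theorem to_bbchallenge_format_spec : Claim_equal_to_bbchallenge_format := by
  intro tm _ hpre
  unfold Spec_to_bbchallenge_format to_bbchallenge_format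
  have h := foldA_eq tm hpre.1 tm 0 "" (by simp) (by simp)
  simp only [Nat.cast_zero] at h
  rw [h]
  cases tm <;> simp
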